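-- pv_equiv track=rewrite | github.com/bchiud/cs61a | hog/hog.py | free_bacon
-- ===== SOURCE A (Python) =====
-- def free_bacon(score):
--     """Return the points scored from rolling 0 dice (Free Bacon).
--
--     score:  The opponent's current score.
--     """
--     assert score < 100, 'The game should be over.'
--     # BEGIN PROBLEM 2
--     "*** YOUR CODE HERE ***"
--     cur_num = score ** 3
--     cur_sum = 0
--     m = -1 if len(str(cur_num)) % 2 == 0 else 1
--     while cur_num > 0:
--         cur_sum = cur_sum + m * ( cur_num % 10 )
--         cur_num = cur_num // 10
--         m = m * -1
--     return 1 + abs(cur_sum)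
-- ===== SOURCE B (Python) =====
-- def free_bacon(score):
--     """Return the points scored from rolling 0 dice (Free Bacon).
--
--     score:  The opponent's current score.
--     """
--     assert score < 100, 'The game should be over.'
--     n = score ** 3
--     if n <= 0:
--         return 1
--     total = 0
--     sign = 1
--     for ch in str(n):
--         total += sign * (ord(ch) - ord('0'))
--         sign = -sign
--     return 1 + abs(total)
-- ===== Notes on version B (the rewrite author's own statement) =====
-- stated objective: idiomatic
-- what changed: B walks the decimal string of score**3 left-to-right with a sign toggle starting at +, instead of A's arithmetic %10///10 loop from the least-significant digit whose start sign is derived from the string-length parity; the parity bookkeeping disappears because the most-significant digit always carries +.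
import Mathlib
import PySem

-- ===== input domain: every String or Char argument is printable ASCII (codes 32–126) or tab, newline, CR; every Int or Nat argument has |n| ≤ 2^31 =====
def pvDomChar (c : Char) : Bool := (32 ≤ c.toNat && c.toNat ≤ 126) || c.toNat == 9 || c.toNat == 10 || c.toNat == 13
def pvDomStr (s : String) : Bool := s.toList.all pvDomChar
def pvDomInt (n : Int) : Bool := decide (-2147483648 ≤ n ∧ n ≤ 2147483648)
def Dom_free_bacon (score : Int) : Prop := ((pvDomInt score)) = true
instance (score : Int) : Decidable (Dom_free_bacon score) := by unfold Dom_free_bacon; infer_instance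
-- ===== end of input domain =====

-- B walks the decimal string of score**3 left-to-right with a sign that starts at +,
-- instead of A's least-significant-first arithmetic loop with a string-length-parity start sign.


-- ===== PORT A =====
-- the 'while cur_num > 0' loop of A, on state (cur_num, cur_sum, m); returns the final cur_sum
def freeBaconLoop (cur_num cur_sum m : Int) : Int :=
  if h : 0 < cur_num then
    freeBaconLoop (PySem.Int.floordiv cur_num 10) (cur_sum + m * PySem.Int.mod cur_num 10) (m * -1)
  else cur_sum
termination_by cur_num.toNat
decreasing_by
  have : PySem.Int.floordiv cur_num 10 = cur_num / 10 := Int.fdiv_eq_ediv_of_nonneg _ (by norm_num)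
  rw [this]; omega

def free_bacon (score : Int) : Int :=
  let cur_num := score ^ 3
  let m : Int := if PySem.Int.mod (PySem.Str.len (PySem.Int.toStr cur_num)) 2 = 0 then -1 else 1
  1 + |freeBaconLoop cur_num 0 m|

-- ===== PORT B =====
def free_bacon_alt (score : Int) : Int :=
  let n := score ^ 3
  if n ≤ 0 then 1
  else
    let p := (PySem.Int.toChars n).foldl
      (fun (st : Int × Int) ch => (st.1 + st.2 * ((ch.toNat : Int) - 48), -st.2)) (0, 1)
    1 + |p.1|

-- ===== PRECONDITION & SPEC =====
-- A asserts score < 100 (AssertionError otherwise); Pre_ excludes exactly those inputs.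
def Pre_free_bacon (score : Int) : Prop := score < 100
instance (score : Int) : Decidable (Pre_free_bacon score) := by unfold Pre_free_bacon; infer_instance
def pvWitness_free_bacon : Int := (37)

def Spec_free_bacon (score : Int) (out : Int) : Prop := out = free_bacon_alt score
instance (score : Int) (out : Int) : Decidable (Spec_free_bacon score out) := by unfold Spec_free_bacon; infer_instance

-- ===== CLAIM (what is proved, stated in full; the proofs are below) =====
def Claim_equal_free_bacon : Prop := ∀ (score : Int), Dom_free_bacon score → Pre_free_bacon score → Spec_free_bacon score (free_bacon score)

-- ===== LEMMAS AND PROOFS =====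

-- alternating sum, + on the head
def altsum : List Int → Int
  | [] => 0
  | d :: ds => d - altsum ds

lemma altsum_append_singleton (xs : List Int) (d : Int) :
    altsum (xs ++ [d]) = altsum xs + (-1) ^ xs.length * d := by
  induction xs with
  | nil => simp [altsum]
  | cons x xs ih => simp [altsum, ih, pow_succ]; ring

lemma altsum_reverse (xs : List Int) :
    altsum xs.reverse = (-1) ^ (xs.length + 1) * altsum xs := by
  induction xs with
  | nil => simp [altsum]
  | cons x xs ih =>
    simp [altsum, altsum_append_singleton, ih, pow_succ]
    ring

lemma abs_altsum_reverse (xs : List Int) : |altsum xs.reverse| = |altsum xs| := by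
  rw [altsum_reverse, abs_mul, abs_pow, abs_neg, abs_one, one_pow, one_mul]

-- A's loop computes cur_sum + m * altsum (digits, least-significant first)
lemma freeBaconLoop_eq (n : Nat) (cur_sum m : Int) :
    freeBaconLoop (n : Int) cur_sum m
      = cur_sum + m * altsum ((Nat.digits 10 n).map Int.ofNat) := by
  induction n using Nat.strong_induction_on generalizing cur_sum m with
  | _ n ih =>
    rw [freeBaconLoop]
    by_cases h : 0 < n
    · have hd : PySem.Int.floordiv (n : Int) 10 = ((n / 10 : Nat) : Int) := by
        have h1 : PySem.Int.floordiv (n : Int) 10 = (n : Int) / 10 :=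
          Int.fdiv_eq_ediv_of_nonneg _ (by norm_num)
        omega
      have hm : PySem.Int.mod (n : Int) 10 = ((n % 10 : Nat) : Int) := by
        have h1 : PySem.Int.mod (n : Int) 10 = (n : Int) % 10 := by
          rw [PySem.Int.mod, Int.fmod_eq_emod]; norm_num
        omega
      have hpos : (0 : Int) < (n : Int) := by exact_mod_cast h
      rw [dif_pos hpos, hd, hm, ih (n / 10) (Nat.div_lt_self h (by norm_num)),
        Nat.digits_def' (by norm_num : 1 < 10) h]
      simp [altsum]; ring
    · have : n = 0 := by omega
      subst this
      simp [altsum]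

lemma foldl_altsum (cs : List Char) (total sign : Int) :
    (cs.foldl (fun (st : Int × Int) ch => (st.1 + st.2 * ((ch.toNat : Int) - 48), -st.2))
      (total, sign)).1
      = total + sign * altsum (cs.map (fun ch => ((ch.toNat : Int) - 48))) := by
  induction cs generalizing total sign with
  | nil => simp [altsum]
  | cons c cs ih => simp [List.foldl, ih, altsum]; ring

-- characterization of core's Nat.toDigits fuel loop
lemma toDigitsCore_eq (f : Nat) : ∀ (n : Nat) (acc : List Char), 0 < n → n < f →
    Nat.toDigitsCore 10 f n acc = ((Nat.digits 10 n).reverse.map Nat.digitChar) ++ acc := by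
  induction f with
  | zero => intro n acc h hf; omega
  | succ f ih =>
    intro n acc h hf
    rw [Nat.toDigitsCore]
    by_cases hz : n / 10 = 0
    · rw [if_pos hz, Nat.digits_def' (by norm_num : 1 < 10) h, hz]
      simp
    · rw [if_neg hz, ih (n / 10) _ (Nat.pos_of_ne_zero hz) (by omega),
        Nat.digits_def' (by norm_num : 1 < 10) h]
      simp

lemma toChars_pos (n : Int) (h : 0 < n) :
    PySem.Int.toChars n = ((Nat.digits 10 n.toNat).reverse.map Nat.digitChar) := by
  rw [PySem.Int.toChars, if_neg (by omega), Nat.toDigits,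
    toDigitsCore_eq _ _ _ (by omega) (by omega)]
  simp

lemma digitChar_val (d : Nat) (h : d < 10) :
    ((Nat.digitChar d).toNat : Int) - 48 = (d : Int) := by
  interval_cases d <;> decide

lemma freeBaconLoop_stop (n s m : Int) (h : ¬ 0 < n) : freeBaconLoop n s m = s := by
  rw [freeBaconLoop]; exact dif_neg h

-- ===== VERDICT (by name: the statement is the Claim_ definition above) =====
lemma free_bacon_def (score : Int) : free_bacon score
    = 1 + |freeBaconLoop (score ^ 3) 0
        (if PySem.Int.mod (PySem.Str.len (PySem.Int.toStr (score ^ 3))) 2 = 0 then -1 else 1)| := rfl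

lemma free_bacon_alt_def (score : Int) : free_bacon_alt score
    = if score ^ 3 ≤ 0 then 1
      else 1 + |((PySem.Int.toChars (score ^ 3)).foldl
        (fun (st : Int × Int) ch => (st.1 + st.2 * ((ch.toNat : Int) - 48), -st.2)) (0, 1)).1| := rfl

theorem free_bacon_spec : Claim_equal_free_bacon := by
  intro score _ _
  show free_bacon score = free_bacon_alt score
  rw [free_bacon_def, free_bacon_alt_def]
  by_cases hpos : 0 < score ^ 3
  · rw [if_neg (show ¬ (score ^ 3 ≤ 0) by omega)]
    set n := score ^ 3 with hn
    set m : Int := if PySem.Int.mod (PySem.Str.len (PySem.Int.toStr n)) 2 = 0 then (-1 : Int) else 1 with hm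
    set ds : List Int := (Nat.digits 10 n.toNat).map Int.ofNat with hds
    have hA : freeBaconLoop n 0 m = m * altsum ds := by
      have := freeBaconLoop_eq n.toNat 0 m
      rw [Int.toNat_of_nonneg (by omega)] at this
      rw [this, zero_add]
    have hB : ((PySem.Int.toChars n).map (fun ch => ((ch.toNat : Int) - 48))) = ds.reverse := by
      rw [toChars_pos n hpos, List.map_map, hds, ← List.map_reverse]
      apply List.map_congr_left
      intro d hd
      exact digitChar_val d (Nat.digits_lt_base (by norm_num) (List.mem_reverse.mp hd))
    rw [hA, foldl_altsum, hB, zero_add, one_mul, abs_mul, abs_altsum_reverse]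
    have habs : |m| = 1 := by rw [hm]; split <;> decide
    rw [habs, one_mul]
  · rw [freeBaconLoop_stop _ _ _ hpos, if_pos (show score ^ 3 ≤ 0 by omega)]
    norm_num
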